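-- pv_equiv track=rewrite | github.com/oak-pioneer-vista/med_rag | python/ingestion/umls/build_biolord_concept_index.py | _shard
-- ===== SOURCE A (Python) =====
-- def _shard(seq: list[tuple[str, str]], n: int) -> list[list[tuple[str, str]]]:
--     """Longest-Processing-Time-first bin pack on name char-length.
--
--     Sorts items by name length descending, then greedily assigns each to
--     the currently shortest bin. Same pattern as `extract_section_entities`
--     -- keeps heaviest shards within ~4/3 of the mean so the slowest worker
--     doesn't stretch wall time when the fixed page contains a tail of
--     very long Concept names (drug protocols, long UMLS descriptors).
--     """
--     bins: list[list[tuple[str, str]]] = [[] for _ in range(n)]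
--     bin_len = [0] * n
--     for item in sorted(seq, key=lambda it: -len(it[1])):
--         i = min(range(n), key=lambda k: bin_len[k])
--         bins[i].append(item)
--         bin_len[i] += len(item[1])
--     return bins
-- ===== SOURCE B (Python) =====
-- def _insort(queue, pair):
--     """Insert pair into a lexicographically sorted queue, keeping it sorted
--     (binary search for the insertion point, then splice)."""
--     lo, hi = 0, len(queue)
--     while lo < hi:
--         mid = (lo + hi) // 2
--         if pair < queue[mid]:
--             hi = mid
--         else:
--             lo = mid + 1
--     return queue[:lo] + [pair] + queue[lo:]
--
--
-- def _shard(seq: list[tuple[str, str]], n: int) -> list[list[tuple[str, str]]]: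
--     """LPT bin pack via an ordered queue of (bin_length, bin_index) pairs:
--     pop the front (the shortest bin, lowest index on ties) and re-insert it
--     in order, instead of a min-scan over all bins per item."""
--     bins = [[] for _ in range(n)]
--     queue = [(0, i) for i in range(n)]
--     for item in sorted(seq, key=lambda it: -len(it[1])):
--         ln, i = queue[0]
--         rest = queue[1:]
--         bins[i].append(item)
--         queue = _insort(rest, (ln + len(item[1]), i))
--     return bins
-- ===== Notes on version B (the rewrite author's own statement) =====
-- stated objective: alternative
-- what changed: Replaces the per-item linear min-scan over all n bin lengths (and the parallel bin_len array) with an ordered queue of (bin_length, bin_index) pairs: each item pops the front pair (shortest bin, lowest index on ties) and re-inserts the updated pair at the position found by a hand-rolled binary search.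
import Mathlib
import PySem

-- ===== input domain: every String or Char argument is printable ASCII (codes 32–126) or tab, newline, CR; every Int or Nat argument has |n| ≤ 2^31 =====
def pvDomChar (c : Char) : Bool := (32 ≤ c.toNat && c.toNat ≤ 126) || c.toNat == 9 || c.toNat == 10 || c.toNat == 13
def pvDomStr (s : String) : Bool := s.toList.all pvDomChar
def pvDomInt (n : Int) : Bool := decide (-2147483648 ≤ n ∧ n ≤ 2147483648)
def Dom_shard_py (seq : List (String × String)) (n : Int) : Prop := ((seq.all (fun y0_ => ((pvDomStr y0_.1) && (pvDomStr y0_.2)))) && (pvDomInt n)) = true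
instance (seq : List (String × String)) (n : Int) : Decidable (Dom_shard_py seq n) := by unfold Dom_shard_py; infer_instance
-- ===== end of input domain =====

-- B replaces A's per-item min-scan over all bin lengths with an ordered queue of
-- (bin_length, bin_index) pairs popped at the front and re-inserted in order (alternative, same worst-case cost).

-- ===== PORT A =====
def shard_py (seq : List (String × String)) (n : Int) : List (List (String × String)) :=
  let bins : List (List (String × String)) := (PySem.List.pyRange 0 n 1).map (fun _ => [])
  let binLen : List Int := PySem.List.pyRepeat [(0 : Int)] n
  let st := (PySem.List.sorted seq (fun it => -(PySem.Str.len it.2)) false).foldl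
    (fun (st : List (List (String × String)) × List Int) item =>
      match PySem.List.min? (PySem.List.pyRange 0 n 1) (fun k => PySem.List.pyGetD st.2 k 0) with
      | none => st  -- Python: min() over an empty range raises ValueError; excluded by Pre_
      | some i =>
        (PySem.List.pySetD st.1 i (PySem.List.pyGetD st.1 i [] ++ [item]),
         PySem.List.pySetD st.2 i (PySem.List.pyGetD st.2 i 0 + PySem.Str.len item.2)))
    (bins, binLen)
  st.1

-- ===== PORT B =====
-- B-side helper: _insort (binary search for the insertion point, then splice)
def insortLoop (queue : List (Int × Int)) (p : Int × Int) (lo hi : Int) : Int :=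
  if _h : lo < hi then
    let mid := PySem.Int.floordiv (lo + hi) 2
    -- queue[mid] is always in range here (0 <= lo <= mid < hi <= len); pyGetD is exact in range
    let q := PySem.List.pyGetD queue mid (0, 0)
    if p.1 < q.1 ∨ (p.1 = q.1 ∧ p.2 < q.2) then insortLoop queue p lo mid
    else insortLoop queue p (mid + 1) hi
  else lo
termination_by (hi - lo).toNat
decreasing_by
  · have hlt : PySem.Int.floordiv (lo + hi) 2 < hi :=
      (PySem.Int.floordiv_lt_iff_lt_mul (by norm_num)).2 (by omega)
    omega
  · have hb := PySem.Int.floordiv_two_mid_bounds (le_of_lt _h)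
    omega

def insortB (queue : List (Int × Int)) (p : Int × Int) : List (Int × Int) :=
  let lo := insortLoop queue p 0 (PySem.List.len queue)
  PySem.List.slice queue none (some lo) ++ [p] ++ PySem.List.slice queue (some lo) none

def shard_py_alt (seq : List (String × String)) (n : Int) : List (List (String × String)) :=
  let bins : List (List (String × String)) := (PySem.List.pyRange 0 n 1).map (fun _ => [])
  let queue : List (Int × Int) := (PySem.List.pyRange 0 n 1).map (fun i => ((0 : Int), i))
  let st := (PySem.List.sorted seq (fun it => -(PySem.Str.len it.2)) false).foldl
    (fun (st : List (List (String × String)) × List (Int × Int)) item =>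
      match st.2 with
      | [] => st  -- Python: queue[0] raises IndexError; excluded by Pre_
      | (ln, i) :: rest =>
        (PySem.List.pySetD st.1 i (PySem.List.pyGetD st.1 i [] ++ [item]),
         insortB rest (ln + PySem.Str.len item.2, i)))
    (bins, queue)
  st.1

-- ===== PRECONDITION & SPEC =====
-- Pre_ excludes only the inputs where Python A raises: a nonempty seq with n ≤ 0
-- (min() of an empty range raises ValueError).
def Pre_shard_py (seq : List (String × String)) (n : Int) : Prop := seq = [] ∨ 1 ≤ n
instance (seq : List (String × String)) (n : Int) : Decidable (Pre_shard_py seq n) := by unfold Pre_shard_py; infer_instance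
def pvWitness_shard_py : (List (String × String)) × Int := ([("a", "xy"), ("b", "z"), ("c", "pqr")], 2)

def Spec_shard_py (seq : List (String × String)) (n : Int) (out : List (List (String × String))) : Prop := out = shard_py_alt seq n
instance (seq : List (String × String)) (n : Int) (out : List (List (String × String))) : Decidable (Spec_shard_py seq n out) := by unfold Spec_shard_py; infer_instance

-- ===== CLAIM (what is proved, stated in full; the proofs are below) =====
def Claim_equal_shard_py : Prop := ∀ (seq : List (String × String)) (n : Int), Dom_shard_py seq n → Pre_shard_py seq n → Spec_shard_py seq n (shard_py seq n)

-- ===== LEMMAS AND PROOFS =====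

-- the queue order: lexicographic ≤ on (bin_length, bin_index)
def lexLe (p q : Int × Int) : Prop := p.1 < q.1 ∨ (p.1 = q.1 ∧ p.2 ≤ q.2)

-- the multiset the queue must represent: (bin_len[k], k) for every k
def pairsOf (l : List Int) : List (Int × Int) :=
  (List.range l.length).map (fun k => (l.getD k 0, (k : Int)))

theorem lexLe_trans {a b c : Int × Int} (h1 : lexLe a b) (h2 : lexLe b c) : lexLe a c := by
  unfold lexLe at *; omega

theorem insortLoop_eq (queue : List (Int × Int)) (p : Int × Int) (lo hi : Int) :
    insortLoop queue p lo hi =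
    if lo < hi then
      (if p.1 < (PySem.List.pyGetD queue (PySem.Int.floordiv (lo + hi) 2) (0, 0)).1
          ∨ (p.1 = (PySem.List.pyGetD queue (PySem.Int.floordiv (lo + hi) 2) (0, 0)).1
             ∧ p.2 < (PySem.List.pyGetD queue (PySem.Int.floordiv (lo + hi) 2) (0, 0)).2)
       then insortLoop queue p lo (PySem.Int.floordiv (lo + hi) 2)
       else insortLoop queue p (PySem.Int.floordiv (lo + hi) 2 + 1) hi)
    else lo := by
  rw [insortLoop]
  rfl

-- the bisection loop returns the split point: everything before it is ≤ p,
-- everything from it on is > p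
theorem insortLoop_spec (queue : List (Int × Int)) (p : Int × Int)
    (hsort : queue.Pairwise lexLe) :
    ∀ (N : Nat) (lo hi : Int), (hi - lo).toNat ≤ N → 0 ≤ lo → lo ≤ hi →
    hi ≤ (queue.length : Int) →
    (∀ (j : Nat) (hj : j < queue.length), (j : Int) < lo → lexLe queue[j] p) →
    (∀ (j : Nat) (hj : j < queue.length), hi ≤ (j : Int) → ¬ lexLe queue[j] p) →
    lo ≤ insortLoop queue p lo hi ∧ insortLoop queue p lo hi ≤ hi ∧
    (∀ (j : Nat) (hj : j < queue.length), (j : Int) < insortLoop queue p lo hi → lexLe queue[j] p) ∧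
    (∀ (j : Nat) (hj : j < queue.length), insortLoop queue p lo hi ≤ (j : Int) → ¬ lexLe queue[j] p) := by
  have hpw := (List.pairwise_iff_getElem).1 hsort
  intro N
  induction N with
  | zero =>
    intro lo hi hN h0 hlh hhl hlow hhigh
    rw [insortLoop_eq, if_neg (by omega)]
    exact ⟨le_refl _, hlh, hlow, fun j hj hge => hhigh j hj (by omega)⟩
  | succ N ih =>
    intro lo hi hN h0 hlh hhl hlow hhigh
    by_cases h : lo < hi
    · rw [insortLoop_eq, if_pos h]
      have hmb := PySem.Int.floordiv_two_mid_bounds (le_of_lt h)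
      have hmlt : PySem.Int.floordiv (lo + hi) 2 < hi :=
        (PySem.Int.floordiv_lt_iff_lt_mul (by norm_num)).2 (by omega)
      set mid := PySem.Int.floordiv (lo + hi) 2 with hmiddef
      have hmn : mid.toNat < queue.length := by omega
      have hmcast : (mid.toNat : Int) = mid := by omega
      have hq : PySem.List.pyGetD queue mid ((0 : Int), (0 : Int)) = queue[mid.toNat] := by
        have h1 := PySem.List.pyGetD_natCast (xs := queue) (n := mid.toNat) (d := ((0 : Int), (0 : Int)))
        rw [hmcast] at h1
        rw [h1]
        exact List.getD_eq_getElem _ _ hmn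
      split_ifs with hc
      · rw [hq] at hc
        have hside : ∀ (j : Nat) (hj : j < queue.length), mid ≤ (j : Int) → ¬ lexLe queue[j] p := by
          intro j hj hge
          by_cases hjm : (j : Int) = mid
          · have hje : j = mid.toNat := by omega
            subst hje
            unfold lexLe; omega
          · have hgt : mid.toNat < j := by omega
            have := hpw mid.toNat j hmn hj hgt
            unfold lexLe at this ⊢; omega
        obtain ⟨b1, b2, b3, b4⟩ := ih lo mid (by omega) h0 (by omega) (by omega) hlow hside
        exact ⟨b1, by omega, b3, b4⟩
      · rw [hq] at hc
        have hside : ∀ (j : Nat) (hj : j < queue.length), (j : Int) < mid + 1 → lexLe queue[j] p := by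
          intro j hj hlt
          by_cases hjm : (j : Int) = mid
          · have hje : j = mid.toNat := by omega
            subst hje
            unfold lexLe; omega
          · have hltm : j < mid.toNat := by omega
            have := hpw j mid.toNat hj hmn hltm
            unfold lexLe at this ⊢; omega
        obtain ⟨b1, b2, b3, b4⟩ := ih (mid + 1) hi (by omega) (by omega) (by omega) hhl hside hhigh
        exact ⟨by omega, b2, b3, b4⟩
    · rw [insortLoop_eq, if_neg h]
      exact ⟨le_refl _, hlh, hlow, fun j hj hge => hhigh j hj (by omega)⟩

theorem insortB_spec (queue : List (Int × Int)) (p : Int × Int)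
    (hsort : queue.Pairwise lexLe) :
    ∃ k : Nat, k ≤ queue.length ∧
      insortB queue p = queue.take k ++ p :: queue.drop k ∧
      (∀ (j : Nat) (hj : j < queue.length), j < k → lexLe queue[j] p) ∧
      (∀ (j : Nat) (hj : j < queue.length), k ≤ j → ¬ lexLe queue[j] p) := by
  obtain ⟨b1, b2, b3, b4⟩ := insortLoop_spec queue p hsort (queue.length : Int).toNat 0
    (queue.length : Int) (by omega) (le_refl 0) (by omega) (by omega)
    (fun j hj hlt => absurd hlt (by omega)) (fun j hj hge => absurd hge (by omega))
  refine ⟨(insortLoop queue p 0 (queue.length : Int)).toNat, by omega, ?_, ?_, ?_⟩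
  · show PySem.List.slice queue none (some (insortLoop queue p 0 (PySem.List.len queue))) ++ [p] ++
        PySem.List.slice queue (some (insortLoop queue p 0 (PySem.List.len queue))) none = _
    have hlen : PySem.List.len queue = (queue.length : Int) := PySem.List.len_eq queue
    rw [hlen, PySem.List.slice_to queue b1, PySem.List.slice_from queue b1, List.append_assoc,
      List.singleton_append]
  · intro j hj hlt
    exact b3 j hj (by omega)
  · intro j hj hge
    exact b4 j hj (by omega)

theorem insortB_perm (queue : List (Int × Int)) (p : Int × Int)
    (hsort : queue.Pairwise lexLe) : (insortB queue p).Perm (p :: queue) := by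
  obtain ⟨k, hk, heq, -, -⟩ := insortB_spec queue p hsort
  rw [heq]
  exact (List.perm_middle).trans (by rw [List.take_append_drop])

theorem insortB_pairwise {queue : List (Int × Int)} (hsort : queue.Pairwise lexLe)
    (p : Int × Int) : (insortB queue p).Pairwise lexLe := by
  obtain ⟨k, hk, heq, hlow, hhigh⟩ := insortB_spec queue p hsort
  rw [heq]
  have hdrople : ∀ y ∈ queue.drop k, lexLe p y := by
    intro y hy
    obtain ⟨i, hi, rfl⟩ := List.mem_iff_getElem.1 hy
    have hjlen : k + i < queue.length := by
      have h2 := hi; rw [List.length_drop] at h2; omega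
    simp only [List.getElem_drop]
    have := hhigh (k + i) hjlen (by omega)
    unfold lexLe at this ⊢; omega
  apply List.pairwise_append.2
  refine ⟨hsort.sublist (List.take_sublist _ _), ?_, ?_⟩
  · exact List.pairwise_cons.2 ⟨hdrople, hsort.sublist (List.drop_sublist _ _)⟩
  · intro x hx y hy
    obtain ⟨i, hi, rfl⟩ := List.mem_iff_getElem.1 hx
    have hilen : i < queue.length ∧ i < k := by
      have h2 := hi; rw [List.length_take] at h2; omega
    simp only [List.getElem_take]
    have hxp : lexLe queue[i] p := hlow i hilen.1 hilen.2
    rcases List.mem_cons.1 hy with rfl | hy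
    · exact hxp
    · exact lexLe_trans hxp (hdrople y hy)

-- Python's min picks the FIRST element attaining the minimum key: everything
-- strictly before the returned element has a strictly larger key.
theorem min?_foldl_first {α κ : Type} [LinearOrder κ] (key : α → κ) :
    ∀ (xs : List α) (m0 m : α),
    xs.foldl (fun acc x => match acc with
      | none => some x
      | some mm => if key x < key mm then some x else some mm) (some m0) = some m →
    (m = m0 ∧ ∀ y ∈ xs, key m0 ≤ key y) ∨
    (∃ pre post, xs = pre ++ m :: post ∧ key m < key m0 ∧
      (∀ y ∈ pre, key m < key y) ∧ (∀ y ∈ post, key m ≤ key y)) := by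
  intro xs
  induction xs with
  | nil => intro m0 m h; left; simp at h; exact ⟨h.symm, by simp⟩
  | cons x t ih =>
    intro m0 m h
    simp only [List.foldl_cons] at h
    by_cases hx : key x < key m0
    · rw [if_pos hx] at h
      rcases ih x m h with ⟨rfl, hall⟩ | ⟨pre, post, rfl, hlt, hpre, hpost⟩
      · right; exact ⟨[], t, rfl, hx, by simp, hall⟩
      · right
        refine ⟨x :: pre, post, rfl, lt_trans hlt hx, ?_, hpost⟩
        intro y hy
        rcases List.mem_cons.1 hy with rfl | hy
        · exact hlt
        · exact hpre y hy
    · rw [if_neg hx] at h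
      rw [not_lt] at hx
      rcases ih m0 m h with ⟨rfl, hall⟩ | ⟨pre, post, rfl, hlt, hpre, hpost⟩
      · left
        refine ⟨rfl, ?_⟩
        intro y hy
        rcases List.mem_cons.1 hy with rfl | hy
        · exact hx
        · exact hall y hy
      · right
        refine ⟨x :: pre, post, rfl, hlt, ?_, hpost⟩
        intro y hy
        rcases List.mem_cons.1 hy with rfl | hy
        · exact lt_of_lt_of_le hlt hx
        · exact hpre y hy

theorem min?_first {α κ : Type} [LinearOrder κ] {key : α → κ} {xs : List α} {m : α}
    (h : PySem.List.min? xs key = some m) :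
    ∃ pre post, xs = pre ++ m :: post ∧
      (∀ y ∈ pre, key m < key y) ∧ (∀ y ∈ post, key m ≤ key y) := by
  cases xs with
  | nil => simp [PySem.List.min?] at h
  | cons x t =>
    have h' : t.foldl (fun acc y => match acc with
        | none => some y
        | some mm => if key y < key mm then some y else some mm) (some x) = some m := by
      simpa [PySem.List.min?] using h
    rcases min?_foldl_first key t x m h' with ⟨rfl, hall⟩ | ⟨pre, post, rfl, hltx, hpre, hpost⟩
    · exact ⟨[], t, rfl, by simp, hall⟩
    · refine ⟨x :: pre, post, rfl, ?_, hpost⟩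
      intro y hy
      rcases List.mem_cons.1 hy with rfl | hy
      · exact hltx
      · exact hpre y hy

theorem mem_pairsOf {l : List Int} {y : Int × Int} :
    y ∈ pairsOf l ↔ ∃ k, k < l.length ∧ y = (l.getD k 0, (k : Int)) := by
  simp only [pairsOf, List.mem_map, List.mem_range]
  constructor
  · rintro ⟨k, hk, rfl⟩; exact ⟨k, hk, rfl⟩
  · rintro ⟨k, hk, rfl⟩; exact ⟨k, hk, rfl⟩

theorem length_pairsOf (l : List Int) : (pairsOf l).length = l.length := by
  simp [pairsOf]

theorem getElem_pairsOf {l : List Int} {k : Nat} (h : k < (pairsOf l).length) :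
    (pairsOf l)[k] = (l.getD k 0, (k : Int)) := by
  simp [pairsOf]

theorem pairsOf_set {l : List Int} {k : Nat} (h : k < l.length) (v : Int) :
    pairsOf (l.set k v) = (pairsOf l).set k (v, (k : Int)) := by
  apply List.ext_getElem
  · simp [pairsOf]
  · intro j h1 h2
    simp only [pairsOf, List.length_set] at *
    rw [List.getElem_set]
    simp only [List.getElem_map, List.getElem_range] at *
    by_cases hjk : k = j
    · subst hjk
      simp [List.getD_eq_getElem?_getD, List.getElem?_set_self (by omega : k < l.length)]
    · simp [List.getD_eq_getElem?_getD, List.getElem?_set_ne hjk, hjk]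

-- 0 ≤ j turns a Python index into a Nat index
theorem pyGetD_toNat (l : List Int) (j : Int) (hj : 0 ≤ j) :
    PySem.List.pyGetD l j 0 = l.getD j.toNat 0 := by
  have h : j = ((j.toNat : Nat) : Int) := by omega
  conv_lhs => rw [h, PySem.List.pyGetD_natCast]

-- the head of the sorted queue IS the bin A's min-scan picks (first index of
-- minimal bin length), together with its length
theorem argmin_head (n : Int) (l : List Int) (hlen : l.length = n.toNat) (hn : 1 ≤ n)
    (v i : Int) (rest : List (Int × Int))
    (hsort : ((v, i) :: rest).Pairwise lexLe)
    (hperm : ((v, i) :: rest).Perm (pairsOf l)) :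
    PySem.List.min? (PySem.List.pyRange 0 n 1) (fun k => PySem.List.pyGetD l k 0) = some i ∧
    PySem.List.pyGetD l i 0 = v := by
  -- the head is one of the (length, index) pairs
  have hhead : (v, i) ∈ pairsOf l := hperm.subset (List.mem_cons_self)
  obtain ⟨k, hk, hpair⟩ := mem_pairsOf.1 hhead
  have hi : i = (k : Int) := congrArg Prod.snd hpair
  have hv : v = l.getD k 0 := congrArg Prod.fst hpair
  -- min? returns some m
  have hne : PySem.List.pyRange 0 n 1 ≠ [] := by
    intro h
    have : (0 : Int) ∈ PySem.List.pyRange 0 n 1 := PySem.List.mem_pyRange_one.2 ⟨le_refl 0, by omega⟩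
    simp [h] at this
  obtain ⟨m, hm⟩ : ∃ m, PySem.List.min? (PySem.List.pyRange 0 n 1)
      (fun k => PySem.List.pyGetD l k 0) = some m := by
    cases hh : PySem.List.min? (PySem.List.pyRange 0 n 1) (fun k => PySem.List.pyGetD l k 0) with
    | none => exact absurd ((PySem.List.min?_eq_none_iff _ _).1 hh) hne
    | some m => exact ⟨m, rfl⟩
  have hmmem : m ∈ PySem.List.pyRange 0 n 1 := PySem.List.min?_mem hm
  have hmrange : 0 ≤ m ∧ m < n := PySem.List.mem_pyRange_one.1 hmmem
  have hirange : (0 : Int) ≤ i ∧ i < n := by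
    constructor
    · omega
    · rw [hi]; omega
  have hmin := PySem.List.min?_isMin hm
  -- key of m ≤ key of i = v
  have hmi : PySem.List.pyGetD l m 0 ≤ v := by
    have := hmin i (PySem.List.mem_pyRange_one.2 hirange)
    rw [hi, PySem.List.pyGetD_natCast, ← hv] at this
    exact this
  -- (key m, m) is a pair, hence in the queue
  have hmk : m.toNat < l.length := by omega
  have hmpair : (l.getD m.toNat 0, (m.toNat : Int)) ∈ pairsOf l :=
    mem_pairsOf.2 ⟨m.toNat, hmk, rfl⟩
  have hmcast : ((m.toNat : Nat) : Int) = m := by omega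
  have hmq : (l.getD m.toNat 0, m) ∈ (v, i) :: rest := by
    apply hperm.symm.subset
    rw [← hmcast]
    exact hmpair
  have hkeym : PySem.List.pyGetD l m 0 = l.getD m.toNat 0 := pyGetD_toNat l m (by omega)
  have him : i = m := by
    rcases List.mem_cons.1 hmq with heq | hmem
    · exact (congrArg Prod.snd heq).symm
    · -- head ≤ that pair lexicographically
      have hle : lexLe (v, i) (l.getD m.toNat 0, m) :=
        (List.pairwise_cons.1 hsort).1 _ hmem
      rcases hle with h1 | ⟨h1, h2⟩
      · exfalso; rw [hkeym] at hmi; exact absurd h1 (not_lt.2 hmi)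
      · -- v = key m and i ≤ m; show m ≤ i using firstness of min
        simp only at h1 h2
        obtain ⟨pre, post, hdec, hpre, hpost⟩ := min?_first hm
        by_cases hlt : i < m
        · exfalso
          have hiin : i ∈ PySem.List.pyRange 0 n 1 := PySem.List.mem_pyRange_one.2 hirange
          rw [hdec] at hiin
          rcases List.mem_append.1 hiin with hp | hc
          · have := hpre i hp
            rw [hkeym, ← h1, hi, PySem.List.pyGetD_natCast, ← hv] at this
            exact lt_irrefl _ this
          · rcases List.mem_cons.1 hc with rfl | hpost'
            · omega
            · have horder := PySem.List.pairwise_lt_pyRange_one (a := 0) (b := n)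
              rw [hdec] at horder
              have := ((List.pairwise_append.1 horder).2.1)
              have := (List.pairwise_cons.1 this).1 i hpost'
              omega
        · omega
  refine ⟨by rw [← him] at hm; exact hm, ?_⟩
  rw [hi, PySem.List.pyGetD_natCast, ← hv]

theorem loop_eq (n : Int) (hn : 1 ≤ n) :
    ∀ (items : List (String × String)) (bins : List (List (String × String)))
      (binLen : List Int) (queue : List (Int × Int)),
    binLen.length = n.toNat →
    queue.Pairwise lexLe →
    queue.Perm (pairsOf binLen) →
    (items.foldl (fun (st : List (List (String × String)) × List Int) item =>
      match PySem.List.min? (PySem.List.pyRange 0 n 1) (fun k => PySem.List.pyGetD st.2 k 0) with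
      | none => st
      | some i =>
        (PySem.List.pySetD st.1 i (PySem.List.pyGetD st.1 i [] ++ [item]),
         PySem.List.pySetD st.2 i (PySem.List.pyGetD st.2 i 0 + PySem.Str.len item.2)))
      (bins, binLen)).1
    = (items.foldl (fun (st : List (List (String × String)) × List (Int × Int)) item =>
      match st.2 with
      | [] => st
      | (ln, i) :: rest =>
        (PySem.List.pySetD st.1 i (PySem.List.pyGetD st.1 i [] ++ [item]),
         insortB rest (ln + PySem.Str.len item.2, i)))
      (bins, queue)).1 := by
  intro items
  induction items with
  | nil => intro bins binLen queue _ _ _; rfl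
  | cons item rest ih =>
    intro bins binLen queue hlen hsort hperm
    match queue with
    | [] =>
      exfalso
      have h1 : (pairsOf binLen).length = 0 := by
        rw [← hperm.length_eq]; rfl
      rw [length_pairsOf] at h1
      omega
    | (v, i) :: t =>
      have hhead : (v, i) ∈ pairsOf binLen := hperm.subset (List.mem_cons_self)
      obtain ⟨k, hk, hpair⟩ := mem_pairsOf.1 hhead
      have hi : i = (k : Int) := congrArg Prod.snd hpair
      have hv : binLen.getD k 0 = v := (congrArg Prod.fst hpair).symm
      subst hi
      obtain ⟨hmin, hget⟩ := argmin_head n binLen hlen hn v (k : Int) t hsort hperm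
      simp only [List.foldl_cons, hmin, PySem.List.pySetD_natCast, PySem.List.pyGetD_natCast, hv]
      apply ih
      · simp [hlen]
      · exact insortB_pairwise (List.pairwise_cons.1 hsort).2 _
      · -- new queue represents the updated bin lengths
        have hkp : k < (pairsOf binLen).length := by rw [length_pairsOf]; exact hk
        have hrest : t.Perm ((pairsOf binLen).eraseIdx k) := by
          apply List.Perm.cons_inv (a := (v, (k : Int)))
          refine hperm.trans ?_
          have hLp : (pairsOf binLen).Perm ((pairsOf binLen)[k] :: (pairsOf binLen).eraseIdx k) :=
            (List.getElem_cons_eraseIdx_perm hkp).symm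
          rw [getElem_pairsOf hkp, hv] at hLp
          exact hLp
        rw [pairsOf_set hk]
        exact (insortB_perm _ _ (List.pairwise_cons.1 hsort).2).trans ((hrest.cons _).trans
          (List.set_perm_cons_eraseIdx hkp _).symm)

theorem shard_py_spec : Claim_equal_shard_py := by
  intro seq n _ hpre
  show shard_py seq n = shard_py_alt seq n
  rcases hpre with rfl | hn
  · rfl
  · simp only [shard_py, shard_py_alt]
    apply loop_eq n hn
    · -- [0]*n has length n
      rw [PySem.List.pyRepeat_singleton, List.length_replicate]
    · -- the initial queue is sorted
      rw [List.pairwise_map]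
      apply (PySem.List.pairwise_lt_pyRange_one (a := 0) (b := n)).imp
      intro a b hab
      exact Or.inr ⟨rfl, le_of_lt hab⟩
    · -- the initial queue lists exactly the pairs (0, k)
      have : (PySem.List.pyRange 0 n 1).map (fun i => ((0 : Int), i))
          = pairsOf (PySem.List.pyRepeat [(0 : Int)] n) := by
        rw [PySem.List.pyRepeat_singleton, PySem.List.pyRange_one]
        unfold pairsOf
        rw [List.length_replicate, List.map_map]
        simp only [Int.sub_zero]
        apply List.map_congr_left
        intro k hk
        rw [List.mem_range] at hk
        simp
      rw [this]
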